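-- pv_equiv track=rewrite | github.com/withNoclout/LeetCode-Med | quiz_maximumpossibleSize.py | maximumPossibleSize
-- ===== SOURCE A (Python) =====
-- def maximumPossibleSize(nums):
--     """
--     :type nums: List[int]
--     :rtype: int
--     """
--     # The problem requires the final array to be non-decreasing.
--     # Since we can only "merge" subarrays into their maximum value,
--     # we cannot eliminate a large number to reveal a smaller number after it.
--     # We can only keep a number if it is >= the current maximum we've decided to keep.
--
--     count = 0
--     current_max = 0  # Constraints say nums[i] >= 1, so 0 is a safe start
--
--     for num in nums:
--         if num >= current_max:
--             # If the current number maintains the non-decreasing order, keep it.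
--             count += 1
--             current_max = num
--         # Else: num < current_max
--         # This number must be merged into the previous maximum (current_max)
--         # to maintain the property, effectively deleting it from the count.
--
--     return count
-- ===== SOURCE B (Python) =====
-- def maximumPossibleSize(nums):
--     # Phase 1: build the inclusive prefix-maximum table (seeded with 0, as values are >= 1).
--     maxes = []
--     m = 0
--     for n in nums:
--         m = max(m, n)
--         maxes.append(m)
--     # Phase 2: count elements equal to their own inclusive running max.
--     return sum(1 for n, mx in zip(nums, maxes) if n == mx)
-- ===== Notes on version B (the rewrite author's own statement) =====
-- stated objective: alternative
-- what changed: Replaces the single conditional-update accumulator loop by a two-phase decomposition: first build the inclusive prefix-maximum table seeded with 0, then count elements equal to their running max with a zip/sum pass (num >= previous max iff num == inclusive prefix max).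
import Mathlib
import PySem

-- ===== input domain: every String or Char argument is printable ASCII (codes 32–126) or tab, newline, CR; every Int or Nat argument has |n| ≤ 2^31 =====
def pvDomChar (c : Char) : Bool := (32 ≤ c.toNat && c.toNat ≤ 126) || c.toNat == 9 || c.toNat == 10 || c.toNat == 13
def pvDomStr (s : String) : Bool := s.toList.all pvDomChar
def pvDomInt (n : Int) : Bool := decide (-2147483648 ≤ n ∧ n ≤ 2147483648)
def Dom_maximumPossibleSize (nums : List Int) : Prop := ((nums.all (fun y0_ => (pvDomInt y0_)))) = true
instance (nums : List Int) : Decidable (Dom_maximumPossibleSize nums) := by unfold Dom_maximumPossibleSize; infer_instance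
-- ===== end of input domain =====

-- B replaces A's single conditional-update accumulator loop by a prefix-maximum table plus a zip-count pass (alternative decomposition, same O(n) cost).

-- ===== PORT A =====
def maximumPossibleSize (nums : List Int) : Int :=
  (nums.foldl (fun (s : Int × Int) num => if num ≥ s.2 then (s.1 + 1, num) else s)
    ((0 : Int), (0 : Int))).1

-- ===== PORT B =====
-- phase 1 of Source B: the inclusive prefix-maximum table, seeded with m
def altPrefixMaxes : List Int → Int → List Int
  | [], _ => []
  | n :: t, m => (max m n) :: altPrefixMaxes t (max m n)

def maximumPossibleSize_alt (nums : List Int) : Int :=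
  (nums.zip (altPrefixMaxes nums 0)).foldl
    (fun acc p => if p.1 = p.2 then acc + 1 else acc) 0

-- ===== PRECONDITION & SPEC =====
def Spec_maximumPossibleSize (nums : List Int) (out : Int) : Prop := out = maximumPossibleSize_alt nums
instance (nums : List Int) (out : Int) : Decidable (Spec_maximumPossibleSize nums out) := by unfold Spec_maximumPossibleSize; infer_instance

-- ===== CLAIM (what is proved, stated in full; the proofs are below) =====
def Claim_equal_maximumPossibleSize : Prop := ∀ (nums : List Int), Dom_maximumPossibleSize nums → Spec_maximumPossibleSize nums (maximumPossibleSize nums)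

-- ===== LEMMAS AND PROOFS =====
-- Invariant: A's fold from state (c, m) counts c plus the elements equal to their
-- prefix max seeded with m (num ≥ m ↔ num = max m num).
theorem pv_main (nums : List Int) : ∀ (c m : Int),
    (nums.foldl (fun (s : Int × Int) num => if num ≥ s.2 then (s.1 + 1, num) else s) (c, m)).1
    = (nums.zip (altPrefixMaxes nums m)).foldl
        (fun acc p => if p.1 = p.2 then acc + 1 else acc) c := by
  induction nums with
  | nil => intro c m; simp [altPrefixMaxes]
  | cons n t ih =>
    intro c m
    simp only [altPrefixMaxes, List.zip_cons_cons, List.foldl_cons]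
    by_cases h : n ≥ m
    · have hmax : max m n = n := max_eq_right h
      simp [h, hmax, ih]
    · have hmax : max m n = m := max_eq_left (le_of_lt (lt_of_not_ge h))
      have hne : n ≠ max m n := by rw [hmax]; omega
      rw [if_neg hne, hmax, ih, if_neg h]

-- ===== VERDICT (by name: the statement is the Claim_ definition above) =====
theorem maximumPossibleSize_spec : Claim_equal_maximumPossibleSize := by
  intro nums _
  unfold Spec_maximumPossibleSize maximumPossibleSize maximumPossibleSize_alt
  exact pv_main nums 0 0
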